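-- pv_equiv track=rewrite | github.com/MI-Lab-study/algorithm | 2024-01-18/송지훈/산모양타일링.py | solution
-- ===== SOURCE A (Python) =====
-- def solution(n, tops):
--     from itertools import product
--
--     total = 0
--
--     if n == 1:
--         return 4
--
--     # 부서진 조각 때문에 만약 바로 전 step에서 1을 선택했다면 2+t를 가져오더라도 1을 빼줘야함
--
--     choose = [0, 1]  # 0은 부서진 조각, 1은 부서지지 않은 조각 선택
--
--     # 즉 0000000, 0000001 같은 모든 이진수 조합 생각해볼 수 있음 단, 마지막은 제외
--     for x in product(choose, repeat=n-1):
--         pr = 1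
--
--         for i in range(n-1):    # 마지막만 제외하고 모두 곱해줌
--             ith_prod_list = [1, 2+tops[i]]  # [1, 2+t] or [2+t, 3+t]
--
--             if i == 0:
--                 pr %= 10007
--                 pr *= ith_prod_list[int(x[0])]%10007
--             else:
--                 if int(x[i - 1]) == 0:  # 조각이 부서짐
--                     pr %= 10007
--                     pr *= ith_prod_list[0]%10007 if int(x[i]) == 0 else (ith_prod_list[1]-1)%10007
--                 else:  # 조각이 안 부서짐
--                     pr %= 10007
--                     pr *= ith_prod_list[0]%10007 if int(x[i]) == 0 else (ith_prod_list[1])%10007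
--
--         ith_prod_list = [2+tops[n-1], 3+tops[n-1]]
--
--         if int(x[n - 2]) == 0:  # 조각이 부서짐
--             pr %= 10007
--             pr *= ith_prod_list[0]%10007
--         else:  # 조각이 안 부서짐
--             pr %= 10007
--             pr *= ith_prod_list[1]%10007
--
--         pr %= 10007
--         total += pr
--         total %= 10007
--
--     return total
-- ===== SOURCE B (Python) =====
-- def solution(n, tops):
--     # Linear DP over positions instead of enumerating all 2^(n-1) bit patterns:
--     # s0/s1 = (mod 10007) sums of partial products over patterns whose last bit is 0/1.
--     if n == 1:
--         return 4
--     p = 10007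
--     s0, s1 = 1, (2 + tops[0]) % p
--     for i in range(1, n - 1):
--         t = tops[i]
--         s0, s1 = (s0 + s1) % p, (s0 * (1 + t) + s1 * (2 + t)) % p
--     t = tops[n - 1]
--     return (s0 * (2 + t) + s1 * (3 + t)) % p
-- ===== Notes on version B (the rewrite author's own statement) =====
-- stated objective: alternative
-- what changed: Replaced the enumeration of all 2^(n-1) broken/unbroken bit patterns (itertools.product) with a linear DP over positions keeping two mod-10007 sums, one per state of the previous piece (broken/unbroken).
import Mathlib
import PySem

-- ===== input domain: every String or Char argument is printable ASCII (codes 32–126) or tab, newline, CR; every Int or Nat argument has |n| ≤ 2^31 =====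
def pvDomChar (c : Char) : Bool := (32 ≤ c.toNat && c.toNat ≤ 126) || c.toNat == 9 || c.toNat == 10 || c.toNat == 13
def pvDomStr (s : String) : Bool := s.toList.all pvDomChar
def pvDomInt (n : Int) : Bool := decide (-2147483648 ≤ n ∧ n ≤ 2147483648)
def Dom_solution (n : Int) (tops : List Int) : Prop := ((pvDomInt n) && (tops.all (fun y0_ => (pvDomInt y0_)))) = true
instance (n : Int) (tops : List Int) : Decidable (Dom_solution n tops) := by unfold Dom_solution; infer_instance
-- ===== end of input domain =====

-- B replaces A's enumeration of all 2^(n-1) broken/unbroken patterns by a linear two-state DP (objective: alternative).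

-- ===== PORT A =====
-- itertools.product([0,1], repeat=m) in product order (last position varies fastest)
def pvTuples (m : Nat) : List (List Int) :=
  match m with
  | 0 => [[]]
  | k+1 => (pvTuples k).flatMap (fun xs => [xs ++ [0], xs ++ [1]])

-- the body of A's inner 'for i in range(n-1)' loop (pr %= 10007; pr *= …)
def pvStepA (tops x : List Int) (pr i : Int) : Int :=
  let ithlist : List Int := [1, 2 + PySem.List.pyGetD tops i 0]
  if i == 0 then
    PySem.Int.mod pr 10007 * PySem.Int.mod (PySem.List.pyGetD ithlist (PySem.List.pyGetD x 0 0) 0) 10007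
  else
    if PySem.List.pyGetD x (i-1) 0 == 0 then
      if PySem.List.pyGetD x i 0 == 0 then
        PySem.Int.mod pr 10007 * PySem.Int.mod (PySem.List.pyGetD ithlist 0 0) 10007
      else
        PySem.Int.mod pr 10007 * PySem.Int.mod (PySem.List.pyGetD ithlist 1 0 - 1) 10007
    else
      if PySem.List.pyGetD x i 0 == 0 then
        PySem.Int.mod pr 10007 * PySem.Int.mod (PySem.List.pyGetD ithlist 0 0) 10007
      else
        PySem.Int.mod pr 10007 * PySem.Int.mod (PySem.List.pyGetD ithlist 1 0) 10007

-- one tuple's contribution: inner loop, then the last factor, then pr %= 10007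
def pvTupleVal (tops : List Int) (n : Int) (x : List Int) : Int :=
  let pr := (PySem.List.pyRange 0 (n-1) 1).foldl (pvStepA tops x) 1
  let ithlist : List Int := [2 + PySem.List.pyGetD tops (n-1) 0, 3 + PySem.List.pyGetD tops (n-1) 0]
  let pr2 := if PySem.List.pyGetD x (n-2) 0 == 0 then
      PySem.Int.mod pr 10007 * PySem.Int.mod (PySem.List.pyGetD ithlist 0 0) 10007
    else
      PySem.Int.mod pr 10007 * PySem.Int.mod (PySem.List.pyGetD ithlist 1 0) 10007
  PySem.Int.mod pr2 10007

def solution (n : Int) (tops : List Int) : Int :=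
  if n == 1 then 4
  else (pvTuples (n-1).toNat).foldl
    (fun total x => PySem.Int.mod (total + pvTupleVal tops n x) 10007) 0

-- ===== PORT B =====
-- B's loop body: two running mod-10007 sums (previous piece broken / unbroken)
def pvStepB (tops : List Int) (s : Int × Int) (i : Int) : Int × Int :=
  let t := PySem.List.pyGetD tops i 0
  (PySem.Int.mod (s.1 + s.2) 10007, PySem.Int.mod (s.1 * (1 + t) + s.2 * (2 + t)) 10007)

def solution_alt (n : Int) (tops : List Int) : Int :=
  if n == 1 then 4
  else
    let s := (PySem.List.pyRange 1 (n-1) 1).foldl (pvStepB tops)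
      (1, PySem.Int.mod (2 + PySem.List.pyGetD tops 0 0) 10007)
    let t := PySem.List.pyGetD tops (n-1) 0
    PySem.Int.mod (s.1 * (2 + t) + s.2 * (3 + t)) 10007

-- ===== PRECONDITION & SPEC =====
-- A raises on every other input: ValueError (product with negative repeat) for n ≤ 0,
-- IndexError (tops[i]) when 2 ≤ n but tops has fewer than n elements.
def Pre_solution (n : Int) (tops : List Int) : Prop := n = 1 ∨ (2 ≤ n ∧ n ≤ tops.length)
instance (n : Int) (tops : List Int) : Decidable (Pre_solution n tops) := by unfold Pre_solution; infer_instance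
def pvWitness_solution : Int × List Int := (3, [1, 2, 3])

def Spec_solution (n : Int) (tops : List Int) (out : Int) : Prop := out = solution_alt n tops
instance (n : Int) (tops : List Int) (out : Int) : Decidable (Spec_solution n tops out) := by unfold Spec_solution; infer_instance

-- ===== CLAIM (what is proved, stated in full; the proofs are below) =====
def Claim_equal_solution : Prop := ∀ (n : Int) (tops : List Int), Dom_solution n tops → Pre_solution n tops → Spec_solution n tops (solution n tops)

-- ===== LEMMAS AND PROOFS =====

@[simp] lemma pvmod (a : Int) : PySem.Int.mod a 10007 = a % 10007 :=
  PySem.Int.mod_eq_emod_of_pos (by norm_num)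

lemma pvmod_self (p a : Int) : Int.ModEq p (a % p) a :=
  Int.emod_emod_of_dvd a dvd_rfl

-- the proof-side name for A's inner loop truncated at j steps
def pvPartial (tops x : List Int) (j : Nat) : Int :=
  (PySem.List.pyRange 0 (j : Int) 1).foldl (pvStepA tops x) 1

-- the proof-side DP state: pvS tops k = B's state after processing positions 1..k
def pvS (tops : List Int) : Nat → Int × Int
  | 0 => (1, (2 + PySem.List.pyGetD tops 0 0) % 10007)
  | k+1 =>
      let s := pvS tops k
      let t := PySem.List.pyGetD tops ((k : Int) + 1) 0
      ((s.1 + s.2) % 10007, (s.1 * (1 + t) + s.2 * (2 + t)) % 10007)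

lemma pvTuples_len (m : Nat) : ∀ x ∈ pvTuples m, x.length = m := by
  induction m with
  | zero => intro x hx; simp [pvTuples] at hx; simp [hx]
  | succ k ih =>
      intro x hx
      simp only [pvTuples, List.mem_flatMap] at hx
      obtain ⟨xs, hxs, hx⟩ := hx
      have := ih xs hxs
      simp at hx
      rcases hx with h | h <;> subst h <;> simp [this]

lemma pvget_prefix (xs : List Int) (b : Int) (i : Int) (h0 : 0 ≤ i) (h : i < xs.length) :
    PySem.List.pyGetD (xs ++ [b]) i 0 = PySem.List.pyGetD xs i 0 := by
  have hlen : i < ((xs ++ [b]).length : Int) := by simp; omega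
  rw [PySem.List.pyGetD_eq_getElem (xs ++ [b]) 0 h0 hlen,
      PySem.List.pyGetD_eq_getElem xs 0 h0 (by exact_mod_cast h)]
  exact List.getElem_append_left (by omega)

lemma pvget_last (xs : List Int) (b : Int) :
    PySem.List.pyGetD (xs ++ [b]) (xs.length : Int) 0 = b := by
  have h0 : (0:Int) ≤ (xs.length : Int) := by positivity
  have hlen : (xs.length : Int) < ((xs ++ [b]).length : Int) := by simp
  rw [PySem.List.pyGetD_eq_getElem (xs ++ [b]) 0 h0 hlen]
  simp

lemma pvPartial_succ (tops x : List Int) (j : Nat) :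
    pvPartial tops x (j+1) = pvStepA tops x (pvPartial tops x j) (j : Int) := by
  unfold pvPartial
  rw [show ((j+1 : Nat) : Int) = (j : Int) + 1 by push_cast; ring,
      PySem.List.pyRange_one_succ_right (by positivity), List.foldl_append]
  simp

lemma pvStepA_prefix (tops xs : List Int) (b pr : Int) (j : Nat) (h : j < xs.length) :
    pvStepA tops (xs ++ [b]) pr (j : Int) = pvStepA tops xs pr (j : Int) := by
  have hget : ∀ i : Int, 0 ≤ i → i < (xs.length : Int) →
      PySem.List.pyGetD (xs ++ [b]) i 0 = PySem.List.pyGetD xs i 0 :=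
    fun i h0 h1 => pvget_prefix xs b i h0 h1
  rcases Nat.eq_zero_or_pos j with hj | hj
  · subst hj
    simp only [pvStepA, Nat.cast_zero, beq_self_eq_true, if_true]
    rw [hget 0 le_rfl (by exact_mod_cast h)]
  · have hc : ((j : Int) == 0) = false := by simp; omega
    simp only [pvStepA, hc, Bool.false_eq_true, if_false]
    rw [hget ((j : Int) - 1) (by omega) (by omega),
        hget (j : Int) (by positivity) (by exact_mod_cast h)]

lemma pvPartial_append (tops xs : List Int) (b : Int) :
    ∀ j : Nat, j ≤ xs.length → pvPartial tops (xs ++ [b]) j = pvPartial tops xs j := by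
  intro j
  induction j with
  | zero => intro _; simp [pvPartial, PySem.List.pyRange_one_eq_nil]
  | succ j ih =>
      intro h
      rw [pvPartial_succ, pvPartial_succ, ih (by omega),
          pvStepA_prefix tops xs b _ j (by omega)]

lemma pvSum_modeq {α : Type} (p : Int) (l : List α) (f g : α → Int)
    (h : ∀ x ∈ l, Int.ModEq p (f x) (g x)) :
    Int.ModEq p ((l.map f).sum) ((l.map g).sum) := by
  induction l with
  | nil => exact Int.ModEq.refl 0
  | cons x l ih =>
      simp only [List.map_cons, List.sum_cons]
      exact Int.ModEq.add (h x (by simp)) (ih (fun y hy => h y (by simp [hy])))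

lemma pvSum_pair (l : List (List Int)) (g : List Int → Int) :
    ((l.flatMap fun xs => [xs ++ [0], xs ++ [1]]).map g).sum
      = (l.map (fun xs => g (xs ++ [0]) + g (xs ++ [1]))).sum := by
  induction l with
  | nil => simp
  | cons xs l ih => simp [List.flatMap_cons, ih]; ring

lemma pvFoldSum (g : List Int → Int) (l : List (List Int)) :
    ∀ acc : Int, l.foldl (fun total x => (total + g x) % 10007) (acc % 10007)
      = (acc + (l.map g).sum) % 10007 := by
  induction l with
  | nil => intro acc; simp
  | cons x l ih =>
      intro acc
      simp only [List.foldl_cons, List.map_cons, List.sum_cons]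
      have h1 : (acc % 10007 + g x) % 10007 = (acc + g x) % 10007 := by omega
      rw [h1, ih (acc + g x)]
      ring_nf

lemma pvStepA_pos0 (tops x : List Int) (pr : Int) (k : Nat)
    (hcur : PySem.List.pyGetD x ((k : Int) + 1) 0 = 0) :
    pvStepA tops x pr ((k : Int) + 1) = pr % 10007 := by
  have hc : (((k : Int) + 1) == 0) = false := by simp; omega
  simp only [pvStepA, hc, Bool.false_eq_true, if_false, hcur]
  norm_num [PySem.List.pyGetD]

lemma pvStepA_pos1 (tops x : List Int) (pr : Int) (k : Nat)
    (hcur : PySem.List.pyGetD x ((k : Int) + 1) 0 = 1) :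
    pvStepA tops x pr ((k : Int) + 1)
      = pr % 10007 * (if PySem.List.pyGetD x (k : Int) 0 == 0
          then (1 + PySem.List.pyGetD tops ((k : Int) + 1) 0) % 10007
          else (2 + PySem.List.pyGetD tops ((k : Int) + 1) 0) % 10007) := by
  have hc : (((k : Int) + 1) == 0) = false := by simp; omega
  have hidx : ((k : Int) + 1 - 1) = (k : Int) := by ring
  simp only [pvStepA, hc, Bool.false_eq_true, if_false, hcur, hidx, pvmod]
  norm_num [PySem.List.pyGetD]
  split_ifs
  · congr 1; congr 1; ring
  · rfl

lemma pvMain (tops : List Int) : ∀ (k : Nat) (c0 c1 : Int),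
    Int.ModEq 10007
      (((pvTuples (k+1)).map (fun x =>
          pvPartial tops x (k+1) *
            (if PySem.List.pyGetD x (k : Int) 0 == 0 then c0 else c1))).sum)
      ((pvS tops k).1 * c0 + (pvS tops k).2 * c1) := by
  intro k
  induction k with
  | zero =>
      intro c0 c1
      have ht : pvTuples 1 = [[0], [1]] := by simp [pvTuples]
      have h0 : pvPartial tops [0] 1 = 1 := by
        rw [show (1 : Nat) = 0 + 1 from rfl, pvPartial_succ]
        simp [pvPartial, PySem.List.pyRange_one_eq_nil, pvStepA, PySem.List.pyGetD]
      have h1 : pvPartial tops [1] 1 = (2 + PySem.List.pyGetD tops 0 0) % 10007 := by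
        rw [show (1 : Nat) = 0 + 1 from rfl, pvPartial_succ]
        simp [pvPartial, PySem.List.pyRange_one_eq_nil, pvStepA, PySem.List.pyGetD]
      rw [ht]
      simp [h0, h1, pvS, PySem.List.pyGetD]
  | succ k ih =>
      intro c0 c1
      have hc1 : ((k + 1 : Nat) : Int) = (k : Int) + 1 := by push_cast; ring
      have hlen := pvTuples_len (k + 1)
      rw [show pvTuples (k+1+1)
            = (pvTuples (k+1)).flatMap (fun xs => [xs ++ [0], xs ++ [1]]) from rfl,
          pvSum_pair]
      refine Int.ModEq.trans (pvSum_modeq 10007 _ _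
        (fun xs => pvPartial tops xs (k+1) *
          (if PySem.List.pyGetD xs (k : Int) 0 == 0
           then c0 + (1 + PySem.List.pyGetD tops ((k : Int) + 1) 0) * c1
           else c0 + (2 + PySem.List.pyGetD tops ((k : Int) + 1) 0) * c1)) ?_) ?_
      · intro xs hxs
        have hx : xs.length = k + 1 := hlen xs hxs
        simp only [hc1]
        have hlast : ∀ b : Int, PySem.List.pyGetD (xs ++ [b]) ((k : Int) + 1) 0 = b := by
          intro b
          rw [show (k : Int) + 1 = (xs.length : Int) by rw [hx]; push_cast; ring, pvget_last]
        have hprev : PySem.List.pyGetD (xs ++ [1]) (k : Int) 0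
            = PySem.List.pyGetD xs (k : Int) 0 :=
          pvget_prefix xs 1 _ (by positivity) (by omega)
        have hP : ∀ b : Int, pvPartial tops (xs ++ [b]) (k+1+1)
            = pvStepA tops (xs ++ [b]) (pvPartial tops xs (k+1)) ((k : Int) + 1) := by
          intro b
          rw [pvPartial_succ, pvPartial_append tops xs b (k+1) (by omega), hc1]
        rw [hP 0, hP 1, pvStepA_pos0 tops _ _ k (hlast 0), pvStepA_pos1 tops _ _ k (hlast 1),
            hlast 0, hlast 1, hprev]
        set P := pvPartial tops xs (k+1) with hPdef
        set t := PySem.List.pyGetD tops ((k : Int) + 1) 0 with htdef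
        by_cases hb : PySem.List.pyGetD xs (k : Int) 0 = 0
        · simp only [hb, beq_self_eq_true, if_true]
          norm_num
          calc P % 10007 * c0 + P % 10007 * ((1 + t) % 10007) * c1
              ≡ P * c0 + P * (1 + t) * c1 [ZMOD 10007] :=
                Int.ModEq.add ((pvmod_self _ _).mul_right _)
                  (((pvmod_self _ _).mul (pvmod_self _ _)).mul_right _)
            _ = P * (c0 + (1 + t) * c1) := by ring
        · have hb' : (PySem.List.pyGetD xs (k : Int) 0 == 0) = false := by
            simp only [beq_eq_false_iff_ne, ne_eq]; exact hb
          simp only [hb', Bool.false_eq_true, if_false]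
          norm_num
          calc P % 10007 * c0 + P % 10007 * ((2 + t) % 10007) * c1
              ≡ P * c0 + P * (2 + t) * c1 [ZMOD 10007] :=
                Int.ModEq.add ((pvmod_self _ _).mul_right _)
                  (((pvmod_self _ _).mul (pvmod_self _ _)).mul_right _)
            _ = P * (c0 + (2 + t) * c1) := by ring
      · refine Int.ModEq.trans (ih _ _) ?_
        simp only [pvS]
        set s := pvS tops k with hsdef
        set t := PySem.List.pyGetD tops ((k : Int) + 1) 0 with htdef
        calc s.1 * (c0 + (1 + t) * c1) + s.2 * (c0 + (2 + t) * c1)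
            = (s.1 + s.2) * c0 + (s.1 * (1 + t) + s.2 * (2 + t)) * c1 := by ring
          _ ≡ (s.1 + s.2) % 10007 * c0 + (s.1 * (1 + t) + s.2 * (2 + t)) % 10007 * c1 [ZMOD 10007] :=
            (Int.ModEq.add ((pvmod_self _ _).mul_right _) ((pvmod_self _ _).mul_right _)).symm

lemma pvFoldB (tops : List Int) : ∀ k : Nat,
    (PySem.List.pyRange 1 ((k : Int) + 1) 1).foldl (pvStepB tops)
        (1, (2 + PySem.List.pyGetD tops 0 0) % 10007)
      = pvS tops k := by
  intro k
  induction k with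
  | zero => simp [pvS, PySem.List.pyRange_one_eq_nil]
  | succ k ih =>
      rw [show ((k+1 : Nat) : Int) + 1 = ((k : Int) + 1) + 1 by push_cast; ring,
          PySem.List.pyRange_one_succ_right (by omega), List.foldl_append, ih]
      simp [pvS, pvStepB]

-- ===== VERDICT (by name: the statement is the Claim_ definition above) =====
theorem solution_spec : Claim_equal_solution := by
  unfold Claim_equal_solution
  intro n tops _ hpre
  unfold Spec_solution
  rcases hpre with h1 | ⟨h2, hlen⟩
  · subst h1; simp [solution, solution_alt]
  · obtain ⟨k, hk⟩ : ∃ k : Nat, n = (k : Int) + 2 := ⟨(n - 2).toNat, by omega⟩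
    have hne : (n == 1) = false := by simp; omega
    simp only [solution, solution_alt, hne, Bool.false_eq_true, if_false, pvmod]
    have hn1 : n - 1 = ((k + 1 : Nat) : Int) := by push_cast; omega
    have hn1' : n - 1 = (k : Int) + 1 := by omega
    have hn2 : n - 2 = ((k : Nat) : Int) := by omega
    have htn : (n - 1).toNat = k + 1 := by omega
    -- A side: the outer fold is the sum of the per-tuple values, mod 10007
    have hA : (pvTuples (n-1).toNat).foldl
        (fun total x => (total + pvTupleVal tops n x) % 10007) 0
        = (((pvTuples (k+1)).map (pvTupleVal tops n)).sum) % 10007 := by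
      rw [htn]
      have h := pvFoldSum (pvTupleVal tops n) (pvTuples (k+1)) 0
      norm_num at h
      exact h
    rw [hA]
    -- B side: the fold over range(1, n-1) is the DP state pvS tops k
    rw [hn1', pvFoldB tops k]
    -- per-tuple value ≡ raw product times the last factor
    have hTV : ∀ x ∈ pvTuples (k+1),
        pvTupleVal tops n x ≡ pvPartial tops x (k+1) *
          (if PySem.List.pyGetD x (k : Int) 0 == 0
           then 2 + PySem.List.pyGetD tops (n - 1) 0
           else 3 + PySem.List.pyGetD tops (n - 1) 0) [ZMOD 10007] := by
      intro x hx
      unfold pvTupleVal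
      have hfold : (PySem.List.pyRange 0 (n-1) 1).foldl (pvStepA tops x) 1
          = pvPartial tops x (k+1) := by rw [hn1]; rfl
      simp only [hfold, hn2, pvmod]
      set t := PySem.List.pyGetD tops (n - 1) 0 with htdef
      by_cases hb : PySem.List.pyGetD x (k : Int) 0 = 0
      · simp only [hb, beq_self_eq_true, if_true]
        norm_num [PySem.List.pyGetD]
        calc pvPartial tops x (k+1) % 10007 * ((2 + t) % 10007) % 10007
            ≡ pvPartial tops x (k+1) % 10007 * ((2 + t) % 10007) [ZMOD 10007] :=
              pvmod_self _ _
          _ ≡ pvPartial tops x (k+1) * (2 + t) [ZMOD 10007] :=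
              (pvmod_self _ _).mul (pvmod_self _ _)
      · have hb' : (PySem.List.pyGetD x (k : Int) 0 == 0) = false := by
          simp only [beq_eq_false_iff_ne, ne_eq]; exact hb
        simp only [hb', Bool.false_eq_true, if_false]
        norm_num [PySem.List.pyGetD]
        calc pvPartial tops x (k+1) % 10007 * ((3 + t) % 10007) % 10007
            ≡ pvPartial tops x (k+1) % 10007 * ((3 + t) % 10007) [ZMOD 10007] :=
              pvmod_self _ _
          _ ≡ pvPartial tops x (k+1) * (3 + t) [ZMOD 10007] :=
              (pvmod_self _ _).mul (pvmod_self _ _)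
    have hchain : ((pvTuples (k+1)).map (pvTupleVal tops n)).sum
        ≡ (pvS tops k).1 * (2 + PySem.List.pyGetD tops (n - 1) 0)
          + (pvS tops k).2 * (3 + PySem.List.pyGetD tops (n - 1) 0) [ZMOD 10007] :=
      (pvSum_modeq 10007 _ _ _ hTV).trans (pvMain tops k _ _)
    rw [hn1'] at hchain
    exact hchain
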